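-- pv_equiv track=rewrite | github.com/Muhammad-Ahmed-Qazi/DSA-CS218 | Lab 05/Exercises/ex_02.py | retrieveTridiagonal
-- ===== SOURCE A (Python) =====
-- def retrieveTridiagonal(u, n):
--     a = [[0 for i in range(n)] for j in range(n)]
--     l = 0
--
--     for i in range(n):
--         for k in range(n):
--             if i == k + 1:  # Lower diagonal
--                 a[i][k] = u[l]
--                 l += 1
--             elif i == k:  # Main diagonal
--                 a[i][k] = u[l]
--                 l += 1
--             elif i == k - 1:  # Upper diagonal
--                 a[i][k] = u[l]
--                 l += 1
--
--     return a
-- ===== SOURCE B (Python) =====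
-- def retrieveTridiagonal(u, n):
--     a = [[0] * n for _ in range(n)]
--     l = 0
--     for i in range(n):
--         if i > 0:              # lower diagonal
--             a[i][i - 1] = u[l]
--             l += 1
--         a[i][i] = u[l]         # main diagonal
--         l += 1
--         if i < n - 1:          # upper diagonal
--             a[i][i + 1] = u[l]
--             l += 1
--     return a
-- ===== Notes on version B (the rewrite author's own statement) =====
-- stated objective: simpler
-- what changed: Replaces A's n*n scan that tests every cell (i,k) for membership in the three diagonals by a single loop over rows that places the (at most three) packed values of each row directly at columns i-1, i, i+1, preserving A's lower->main->upper consumption order of u.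
import Mathlib
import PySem

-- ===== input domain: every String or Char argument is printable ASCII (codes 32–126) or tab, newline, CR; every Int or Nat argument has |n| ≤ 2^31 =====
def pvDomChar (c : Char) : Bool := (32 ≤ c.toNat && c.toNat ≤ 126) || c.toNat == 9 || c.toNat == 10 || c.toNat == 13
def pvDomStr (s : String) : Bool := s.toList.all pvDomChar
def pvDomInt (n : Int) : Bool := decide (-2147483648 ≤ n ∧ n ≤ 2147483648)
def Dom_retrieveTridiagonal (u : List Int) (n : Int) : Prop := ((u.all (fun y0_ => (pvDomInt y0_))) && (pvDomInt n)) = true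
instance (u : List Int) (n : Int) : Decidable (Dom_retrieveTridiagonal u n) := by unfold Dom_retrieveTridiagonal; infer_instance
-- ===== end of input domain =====

-- B replaces A's n×n scan testing every cell for diagonal membership by direct placement
-- of each row's packed values at columns i-1, i, i+1 (objective: simpler).

-- ===== PORT A =====
-- a[i][k] = v for 0 ≤ i, k in range (both ports only use it with in-range nonnegative indices)
def tdSet (a : List (List Int)) (i k : Int) (v : Int) : List (List Int) :=
  a.set i.toNat ((a.getD i.toNat []).set k.toNat v)

-- u[l] for 0 ≤ l; Python raises IndexError for l ≥ len(u) — those inputs are excluded by Pre_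
def tdGet (u : List Int) (l : Int) : Int := u.getD l.toNat 0

def stepA (u : List Int) (i : Int) (st : List (List Int) × Int) (k : Int) :
    List (List Int) × Int :=
  if i = k + 1 then (tdSet st.1 i k (tdGet u st.2), st.2 + 1)
  else if i = k then (tdSet st.1 i k (tdGet u st.2), st.2 + 1)
  else if i = k - 1 then (tdSet st.1 i k (tdGet u st.2), st.2 + 1)
  else st

def retrieveTridiagonal (u : List Int) (n : Int) : List (List Int) :=
  let a := (PySem.List.pyRange 0 n 1).map (fun _ => (PySem.List.pyRange 0 n 1).map (fun _ => (0 : Int)))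
  ((PySem.List.pyRange 0 n 1).foldl
    (fun st i => (PySem.List.pyRange 0 n 1).foldl (stepA u i) st) (a, 0)).1

-- ===== PORT B =====
def stepB (u : List Int) (n : Int) (st : List (List Int) × Int) (i : Int) :
    List (List Int) × Int :=
  let st1 := if 0 < i then (tdSet st.1 i (i - 1) (tdGet u st.2), st.2 + 1) else st
  let st2 := (tdSet st1.1 i i (tdGet u st1.2), st1.2 + 1)
  if i < n - 1 then (tdSet st2.1 i (i + 1) (tdGet u st2.2), st2.2 + 1) else st2

def retrieveTridiagonal_alt (u : List Int) (n : Int) : List (List Int) :=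
  let a := (PySem.List.pyRange 0 n 1).map (fun _ => List.replicate n.toNat (0 : Int))
  ((PySem.List.pyRange 0 n 1).foldl (stepB u n) (a, 0)).1

-- ===== PRECONDITION & SPEC =====
-- Pre_ excludes exactly the inputs where Python A raises IndexError: u shorter than the
-- 3n-2 packed entries the loop reads (for n ≤ 0 the bound is nonpositive, so all u qualify).
def Pre_retrieveTridiagonal (u : List Int) (n : Int) : Prop := 3 * n - 2 ≤ (u.length : Int)
instance (u : List Int) (n : Int) : Decidable (Pre_retrieveTridiagonal u n) := by
  unfold Pre_retrieveTridiagonal; infer_instance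

def pvWitness_retrieveTridiagonal : List Int × Int := ([1, 2, 3, 4], 2)

def Spec_retrieveTridiagonal (u : List Int) (n : Int) (out : List (List Int)) : Prop := out = retrieveTridiagonal_alt u n
instance (u : List Int) (n : Int) (out : List (List Int)) : Decidable (Spec_retrieveTridiagonal u n out) := by unfold Spec_retrieveTridiagonal; infer_instance

-- ===== CLAIM (what is proved, stated in full; the proofs are below) =====
def Claim_equal_retrieveTridiagonal : Prop := ∀ (u : List Int) (n : Int), Dom_retrieveTridiagonal u n → Pre_retrieveTridiagonal u n → Spec_retrieveTridiagonal u n (retrieveTridiagonal u n)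

-- ===== LEMMAS AND PROOFS =====

theorem foldl_id {α β : Type} (f : α → β → α) (l : List β)
    (h : ∀ s k, k ∈ l → f s k = s) : ∀ s, l.foldl f s = s := by
  induction l with
  | nil => intro s; rfl
  | cons x xs ih =>
    intro s
    rw [List.foldl_cons, h s x List.mem_cons_self]
    exact ih (fun s k hk => h s k (List.mem_cons_of_mem _ hk)) s

theorem stepA_id (u : List Int) (i : Int) (st : List (List Int) × Int) (k : Int)
    (h : k < i - 1 ∨ i + 1 < k) : stepA u i st k = st := by
  unfold stepA
  rw [if_neg (by omega), if_neg (by omega), if_neg (by omega)]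

theorem foldl_stepA_id (u : List Int) (i a b : Int)
    (h : ∀ k, a ≤ k → k < b → k < i - 1 ∨ i + 1 < k) (st : List (List Int) × Int) :
    (PySem.List.pyRange a b 1).foldl (stepA u i) st = st := by
  refine foldl_id _ _ (fun s k hk => ?_) st
  rw [PySem.List.mem_pyRange_one] at hk
  exact stepA_id u i s k (h k hk.1 hk.2)

theorem stepA_lower (u : List Int) (i : Int) (st : List (List Int) × Int) :
    stepA u i st (i - 1) = (tdSet st.1 i (i - 1) (tdGet u st.2), st.2 + 1) := by
  unfold stepA; rw [if_pos (by omega)]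

theorem stepA_main (u : List Int) (i : Int) (st : List (List Int) × Int) :
    stepA u i st i = (tdSet st.1 i i (tdGet u st.2), st.2 + 1) := by
  unfold stepA; rw [if_neg (by omega), if_pos rfl]

theorem stepA_upper (u : List Int) (i : Int) (st : List (List Int) × Int) :
    stepA u i st (i + 1) = (tdSet st.1 i (i + 1) (tdGet u st.2), st.2 + 1) := by
  unfold stepA; rw [if_neg (by omega), if_neg (by omega), if_pos (by omega)]

theorem inner_eq_stepB (u : List Int) (n i : Int) (h0 : 0 ≤ i) (h1 : i < n)
    (st : List (List Int) × Int) :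
    (PySem.List.pyRange 0 n 1).foldl (stepA u i) st = stepB u n st i := by
  by_cases hp : 0 < i <;> by_cases hq : i < n - 1
  · -- interior row: split as [0,i-1) ++ [i-1,i,i+1] ++ [i+2,n)
    rw [PySem.List.pyRange_one_append 0 (i - 1) n (by omega) (by omega),
        PySem.List.pyRange_one_cons (show i - 1 < n by omega)]
    rw [show i - 1 + 1 = i from by omega,
        PySem.List.pyRange_one_cons (show i < n by omega),
        PySem.List.pyRange_one_cons (show i + 1 < n by omega)]
    rw [List.foldl_append, List.foldl_cons, List.foldl_cons, List.foldl_cons]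
    rw [foldl_stepA_id u i 0 (i - 1) (fun k hk1 hk2 => by omega) st,
        stepA_lower, stepA_main, stepA_upper,
        foldl_stepA_id u i (i + 1 + 1) n (fun k hk1 hk2 => by omega)]
    unfold stepB
    rw [if_pos hp, if_pos hq]
  · -- last row, i = n-1 > 0
    rw [PySem.List.pyRange_one_append 0 (i - 1) n (by omega) (by omega),
        PySem.List.pyRange_one_cons (show i - 1 < n by omega)]
    rw [show i - 1 + 1 = i from by omega,
        PySem.List.pyRange_one_cons (show i < n by omega),
        PySem.List.pyRange_one_eq_nil (show n ≤ i + 1 by omega)]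
    rw [List.foldl_append, List.foldl_cons, List.foldl_cons, List.foldl_nil]
    rw [foldl_stepA_id u i 0 (i - 1) (fun k hk1 hk2 => by omega) st,
        stepA_lower, stepA_main]
    unfold stepB
    rw [if_pos hp, if_neg hq]
  · -- first row, i = 0, n ≥ 2
    have hi : i = 0 := by omega
    subst hi
    rw [PySem.List.pyRange_one_cons (show (0 : Int) < n by omega),
        PySem.List.pyRange_one_cons (show (0 : Int) + 1 < n by omega)]
    rw [List.foldl_cons, List.foldl_cons]
    rw [show stepA u 0 st 0 = stepA u 0 st (0 : Int) from rfl, stepA_main]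
    rw [show (0 : Int) + 1 = 0 + 1 from rfl, stepA_upper,
        foldl_stepA_id u 0 (0 + 1 + 1) n (fun k hk1 hk2 => by omega)]
    unfold stepB
    rw [if_neg hp, if_pos hq]
  · -- n = 1, i = 0
    have hi : i = 0 := by omega
    have hn : n = 1 := by omega
    subst hi; subst hn
    rw [PySem.List.pyRange_one_cons (show (0 : Int) < 1 by omega),
        PySem.List.pyRange_one_eq_nil (show (1 : Int) ≤ 0 + 1 by omega)]
    rw [List.foldl_cons, List.foldl_nil, stepA_main]
    unfold stepB
    rw [if_neg hp, if_neg hq]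

theorem init_row_eq (n : Int) :
    (PySem.List.pyRange 0 n 1).map (fun _ => (0 : Int)) = List.replicate n.toNat 0 := by
  rw [List.map_const']
  rw [PySem.List.length_pyRange_one]
  norm_num

-- ===== VERDICT (by name: the statement is the Claim_ definition above) =====
theorem retrieveTridiagonal_spec : Claim_equal_retrieveTridiagonal := by
  intro u n _ _
  unfold Spec_retrieveTridiagonal retrieveTridiagonal retrieveTridiagonal_alt
  rw [init_row_eq]
  refine congrArg Prod.fst ?_
  apply PySem.List.foldl_congr_mem
  intro acc i hi
  rw [PySem.List.mem_pyRange_one] at hi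
  exact inner_eq_stepB u n i hi.1 hi.2 acc
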